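-- pv_equiv track=rewrite | github.com/avakar/limecc | src/limecc/regex_parser.py | _regex_lexer
-- ===== SOURCE A (Python) =====
-- def _regex_lexer(input):
--     esc = False
--     for ch in input:
--         if esc:
--             yield ('esc', ch)
--             esc = False
--         elif ch == '\\':
--             esc = True
--         elif ch in '+*[]()-|?^.':
--             yield (ch, ch)
--         else:
--             yield ('c', ch)
--     if esc:
--         yield ('c', '\\')
-- ===== SOURCE B (Python) =====
-- def _regex_lexer(input):
--     special = '+*[]()-|?^.'
--     parts = input.split('\\')
--     for ch in parts[0]:
--         yield (ch, ch) if ch in special else ('c', ch)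
--     i = 1
--     while i < len(parts):
--         p = parts[i]
--         if p:
--             yield ('esc', p[0])
--             tail = p[1:]
--             i += 1
--         elif i + 1 < len(parts):
--             # two adjacent separators = an escaped backslash
--             yield ('esc', '\\')
--             tail = parts[i + 1]
--             i += 2
--         else:
--             # string ended on a lone backslash
--             yield ('c', '\\')
--             break
--         for ch in tail:
--             yield (ch, ch) if ch in special else ('c', ch)
-- ===== Notes on version B (the rewrite author's own statement) =====
-- stated objective: alternative
-- what changed: Replaces the per-character state machine (esc flag carried across iterations) by a staged split-based lexer: the string is split once on backslash, the head segment is classified plainly, and each subsequent segment's first character (or a separator-pair / trailing separator) is decoded as the escape before classifying the rest.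
import Mathlib
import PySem

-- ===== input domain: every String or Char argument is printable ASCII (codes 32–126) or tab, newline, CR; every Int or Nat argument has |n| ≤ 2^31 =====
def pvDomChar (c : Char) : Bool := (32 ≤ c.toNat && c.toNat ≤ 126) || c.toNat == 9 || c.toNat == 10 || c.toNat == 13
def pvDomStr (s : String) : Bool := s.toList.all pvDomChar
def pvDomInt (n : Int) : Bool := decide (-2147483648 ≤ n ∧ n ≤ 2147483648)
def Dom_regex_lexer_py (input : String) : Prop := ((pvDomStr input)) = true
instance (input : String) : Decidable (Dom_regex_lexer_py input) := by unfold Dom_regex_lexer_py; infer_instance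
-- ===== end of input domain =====

-- B replaces A's per-character escape-flag state machine by a staged split-on-backslash lexer; objective: alternative, same cost.

-- ===== PORT A =====
-- A's generator loop: state `esc` carried across iterations, plus the trailing-`esc` yield.
def regexLexerA : Bool → List Char → List (String × String)
  | true, [] => [("c", "\\")]
  | false, [] => []
  | true, ch :: t => ("esc", ch.toString) :: regexLexerA false t
  | false, ch :: t =>
      if ch = '\\' then regexLexerA true t
      else if ['+','*','[',']','(',')','-','|','?','^','.'].contains ch then
        (ch.toString, ch.toString) :: regexLexerA false t
      else ("c", ch.toString) :: regexLexerA false t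

def regex_lexer_py (input : String) : List (String × String) :=
  regexLexerA false input.toList

-- ===== PORT B =====
-- hand port of Python's str.split('\\') (single-char separator, keeps empty parts); exact
def bSplitBS : List Char → List (List Char)
  | [] => [[]]
  | c :: t =>
      if c = '\\' then [] :: bSplitBS t
      else
        match bSplitBS t with
        | h :: r => (c :: h) :: r
        | [] => [[c]]

-- the plain-classification pass (B's `for ch in …: yield …`)
def bClassify : List Char → List (String × String)
  | [] => []
  | ch :: t =>
      (if ['+','*','[',']','(',')','-','|','?','^','.'].contains ch then
        (ch.toString, ch.toString) else ("c", ch.toString)) :: bClassify t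

-- B's while-loop over the segments after the first: each one follows a separator
def bRest : List (List Char) → List (String × String)
  | [] => []
  | p :: t =>
      match p with
      | c :: cs => ("esc", c.toString) :: (bClassify cs ++ bRest t)
      | [] =>
          match t with
          | q :: t' => ("esc", "\\") :: (bClassify q ++ bRest t')
          | [] => [("c", "\\")]

def regex_lexer_py_alt (input : String) : List (String × String) :=
  match bSplitBS input.toList with
  | p :: t => bClassify p ++ bRest t
  | [] => []

-- ===== PRECONDITION & SPEC =====
def Spec_regex_lexer_py (input : String) (out : List (String × String)) : Prop := out = regex_lexer_py_alt input
instance (input : String) (out : List (String × String)) : Decidable (Spec_regex_lexer_py input out) := by unfold Spec_regex_lexer_py; infer_instance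

-- ===== CLAIM (what is proved, stated in full; the proofs are below) =====
def Claim_equal_regex_lexer_py : Prop := ∀ (input : String), Dom_regex_lexer_py input → Spec_regex_lexer_py input (regex_lexer_py input)

-- ===== LEMMAS AND PROOFS =====
theorem bSplitBS_ne_nil (l : List Char) : bSplitBS l ≠ [] := by
  cases l with
  | nil => simp [bSplitBS]
  | cons c t =>
      simp only [bSplitBS]
      split
      · simp
      · cases h : bSplitBS t <;> simp

theorem regexLexerA_eq_B (l : List Char) :
    (regexLexerA false l =
      (match bSplitBS l with | p :: t => bClassify p ++ bRest t | [] => [])) ∧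
    regexLexerA true l = bRest (bSplitBS l) := by
  induction l with
  | nil => exact ⟨rfl, rfl⟩
  | cons c t ih =>
      obtain ⟨ihF, ihT⟩ := ih
      by_cases hc : c = '\\'
      · subst hc
        constructor
        · show regexLexerA true t = _
          simp [bSplitBS, bClassify, ihT]
        · show ("esc", "\\") :: regexLexerA false t = _
          obtain ⟨h, r, hs⟩ := List.exists_cons_of_ne_nil (bSplitBS_ne_nil t)
          rw [hs] at ihF; simp only at ihF
          simp [bSplitBS, hs, bRest, ihF]
      · have hsp : bSplitBS (c :: t) =
            (match bSplitBS t with | h :: r => (c :: h) :: r | [] => [[c]]) := by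
          simp [bSplitBS, hc]
        obtain ⟨h, r, hs⟩ := List.exists_cons_of_ne_nil (bSplitBS_ne_nil t)
        rw [hs] at hsp; simp only at hsp
        rw [hs] at ihF; simp only at ihF
        constructor
        · simp only [regexLexerA, if_neg hc, hsp, bClassify, List.cons_append]
          split <;> rw [ihF]
        · simp only [regexLexerA, hsp, bRest, ihF]

-- ===== VERDICT (by name: the statement is the Claim_ definition above) =====
theorem regex_lexer_py_spec : Claim_equal_regex_lexer_py := by
  intro input _
  unfold Spec_regex_lexer_py regex_lexer_py regex_lexer_py_alt
  exact (regexLexerA_eq_B input.toList).1
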